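-- pv_equiv track=rewrite | github.com/rafaeltardivo/sort-algorithms | insertion_sort.py | first_insertion_sort
-- ===== SOURCE A (Python) =====
-- def first_insertion_sort(numbers):
--     """Non recursive first implementation of insertion sort.This one does
--     not have any optimization and it is considered to be the worst one. The
--     iteration counter will be present to show the difference between each
--     implementation.
--
--     Args:
--         numbers (list): list of integers to be sorted.
--     Returns:
--         numbers (list): sorted list.
--         iterations (int): number of iterations the algorithm took to sort
--         the list.
--
--     Args:
--         numbers (list): list of integers to be sorted.
--     Returns:
--         numbers (list): sorted list.
--     """
--     size = len(numbers)
--     iterations = 0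
--
--     for i in range(size):
--         iterations += 1
--         j = i
--         while j > 0:
--             iterations += 1
--             if numbers[j] < numbers[j - 1]:
--                 numbers[j], numbers[j - 1] = numbers[j - 1], numbers[j]
--             j -= 1
--     return numbers, iterations
-- ===== SOURCE B (Python) =====
-- def first_insertion_sort(numbers):
--     """Same result as A: sorted list plus iteration count.
--
--     A's inner while loop always runs from j = i down to 1, so the count is
--     exactly n + n*(n-1)//2 regardless of the data; the values are simply the
--     sorted list.  (Unlike A, this does not sort the input list in place.)
--     """
--     n = len(numbers)
--     return sorted(numbers), n + n * (n - 1) // 2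
-- ===== Notes on version B (the rewrite author's own statement) =====
-- stated objective: faster
-- what changed: Replaces the quadratic swap loops by sorted() for the values and the closed form n + n*(n-1)//2 for the iteration counter (A's inner loop always runs exactly i steps).
import Mathlib
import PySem

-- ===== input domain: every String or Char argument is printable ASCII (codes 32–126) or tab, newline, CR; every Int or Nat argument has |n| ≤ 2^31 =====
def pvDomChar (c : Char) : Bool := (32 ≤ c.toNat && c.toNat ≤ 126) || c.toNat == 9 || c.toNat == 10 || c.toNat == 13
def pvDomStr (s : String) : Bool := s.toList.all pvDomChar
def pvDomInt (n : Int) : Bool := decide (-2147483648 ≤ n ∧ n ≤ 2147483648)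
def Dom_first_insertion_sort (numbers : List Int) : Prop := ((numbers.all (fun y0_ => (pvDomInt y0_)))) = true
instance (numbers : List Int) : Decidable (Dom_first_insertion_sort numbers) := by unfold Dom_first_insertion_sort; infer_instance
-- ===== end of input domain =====

-- B replaces A's quadratic swap loops by sorted() plus the closed form n + n*(n-1)//2
-- for the counter (A's inner loop always runs exactly i steps); A sorts its argument
-- in place, B does not — the equivalence proved here is about the return value only.

-- ===== PORT A =====
-- the Python while-loop 'while j > 0: …; j -= 1' as recursion on j; indices j, j-1
-- are always in range here, so List.getD is exact for the Python numbers[j] reads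
def pvInner (xs : List Int) (iterations : Int) : Nat → List Int × Int
  | 0 => (xs, iterations)
  | Nat.succ j =>
      let iterations' := iterations + 1
      let xs' := if xs.getD (j+1) 0 < xs.getD j 0
                 then (xs.set (j+1) (xs.getD j 0)).set j (xs.getD (j+1) 0)
                 else xs
      pvInner xs' iterations' j

def first_insertion_sort (numbers : List Int) : List Int × Int :=
  let size := numbers.length
  (List.range size).foldl (fun st i => pvInner st.1 (st.2 + 1) i) (numbers, 0)

-- ===== PORT B =====
-- n + n*(n-1)/2 in Nat: exact for Python's // since both operands are nonnegative
def first_insertion_sort_alt (numbers : List Int) : List Int × Int :=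
  let n := numbers.length
  (PySem.List.sorted numbers (fun x => x) false, ((n + n * (n - 1) / 2 : Nat) : Int))

-- ===== PRECONDITION & SPEC =====
def Spec_first_insertion_sort (numbers : List Int) (out : List Int × Int) : Prop := out = first_insertion_sort_alt numbers
instance (numbers : List Int) (out : List Int × Int) : Decidable (Spec_first_insertion_sort numbers out) := by unfold Spec_first_insertion_sort; infer_instance

-- ===== CLAIM (what is proved, stated in full; the proofs are below) =====
def Claim_equal_first_insertion_sort : Prop := ∀ (numbers : List Int), Dom_first_insertion_sort numbers → Spec_first_insertion_sort numbers (first_insertion_sort numbers)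

-- ===== LEMMAS AND PROOFS =====

-- the insertion step sorted() is characterised by (sorted_eq_foldl_insertBy)
def pvIns (x : Int) (acc : List Int) : List Int :=
  PySem.List.insertBy (fun a b => decide (a < b)) x acc

-- the exact number of iterations A performs after i outer passes
def pvT : Nat → Nat
  | 0 => 0
  | i + 1 => pvT i + 1 + i

lemma pvT_closed : ∀ n : Nat, pvT n = n + n * (n - 1) / 2 := by
  intro n
  induction n with
  | zero => rfl
  | succ m ih =>
      cases m with
      | zero => rfl
      | succ k =>
          have h : (k + 1 + 1) * (k + 1 + 1 - 1) = (k + 1) * (k + 1 - 1) + 2 * (k + 1) := by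
            simp only [Nat.add_sub_cancel]; ring
          simp only [pvT] at *
          omega

lemma pv_getD_append (t : List Int) (y : Int) (r : List Int) :
    (t ++ y :: r).getD t.length 0 = y := by
  induction t with
  | nil => rfl
  | cons a s ih => simpa using ih

lemma pv_take_append (t : List Int) (y : Int) (r : List Int) :
    (t ++ y :: r).take (t.length + 1) = t ++ [y] := by
  induction t with
  | nil => rfl
  | cons a s ih => simpa using ih

lemma pv_set_swap (t : List Int) (a x : Int) (rest : List Int) :
    ((t ++ a :: x :: rest).set (t.length + 1) a).set t.length x = t ++ x :: a :: rest := by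
  induction t with
  | nil => rfl
  | cons b s ih => simp [ih]

-- an already-sorted prefix: the remaining comparisons never swap
lemma pvInner_no_swap : ∀ (j : Nat) (zs : List Int) (c : Int),
    j < zs.length → (zs.take (j + 1)).Pairwise (· ≤ ·) →
    pvInner zs c j = (zs, c + j) := by
  intro j
  induction j with
  | zero => intro zs c _ _; simp [pvInner]
  | succ j ih =>
      intro zs c hlen hsort
      have hj1 : j + 1 < zs.length := hlen
      have hle : zs[j] ≤ zs[j+1] := by
        have hlt : j + 2 ≤ zs.length := hlen
        have hpg := List.pairwise_iff_getElem.mp hsort j (j+1)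
          (by simp [List.length_take]; omega) (by simp [List.length_take]; omega) (by omega)
        simpa using hpg
      have hns : ¬ zs.getD (j+1) 0 < zs.getD j 0 := by
        rw [List.getD_eq_getElem _ _ hj1, List.getD_eq_getElem _ _ (by omega : j < zs.length)]
        omega
      have hsort' : (zs.take (j + 1)).Pairwise (· ≤ ·) := by
        have : zs.take (j+1) = (zs.take (j+2)).take (j+1) := by
          rw [List.take_take]; simp
        rw [this]
        exact hsort.sublist (List.take_sublist _ _)
      simp only [pvInner, hns, if_false]
      rw [ih zs (c+1) (by omega) hsort']
      simp only [Prod.mk.injEq, true_and]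
      push_cast; ring

lemma pv_insertBy_append (x a : Int) (hxa : x < a) : ∀ t : List Int,
    pvIns x (t ++ [a]) = pvIns x t ++ [a] := by
  intro t
  induction t with
  | nil => simp [pvIns, PySem.List.insertBy, hxa]
  | cons b s ihs =>
      simp only [pvIns, List.cons_append, PySem.List.insertBy]
      by_cases hxb : x < b
      · simp [hxb]
      · simp only [hxb, decide_false]
        simp only [pvIns] at ihs
        rw [ihs]
        simp

-- bubbling x down through a sorted prefix is insertion
lemma pvInner_bubble : ∀ (s : List Int), s.Pairwise (· ≤ ·) →
    ∀ (x : Int) (rest : List Int) (c : Int),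
    pvInner (s ++ x :: rest) c s.length = (pvIns x s ++ rest, c + s.length) := by
  intro s
  induction s using List.reverseRecOn with
  | nil => intro _ x rest c; simp [pvInner, pvIns, PySem.List.insertBy]
  | append_singleton t a ih =>
      intro hsort x rest c
      have hta : ∀ y ∈ t, y ≤ a := by
        have := List.pairwise_append.mp hsort
        intro y hy; exact this.2.2 y hy a (by simp)
      have ht : t.Pairwise (· ≤ ·) := (List.pairwise_append.mp hsort).1
      have hlen : (t ++ [a]).length = t.length + 1 := by simp
      have hshape : (t ++ [a]) ++ x :: rest = t ++ a :: x :: rest := by simp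
      rw [hlen, hshape]
      have hgx : (t ++ a :: x :: rest).getD (t.length + 1) 0 = x := by
        have h := pv_getD_append (t ++ [a]) x rest
        simp only [List.length_append, List.length_cons, List.length_nil, List.append_assoc,
          List.cons_append, List.nil_append, Nat.zero_add] at h
        exact h
      have hga : (t ++ a :: x :: rest).getD t.length 0 = a := pv_getD_append t a _
      by_cases hxa : x < a
      · simp only [pvInner, hgx, hga, if_pos hxa, pv_set_swap]
        rw [ih ht x (a :: rest) (c+1)]
        rw [pv_insertBy_append x a hxa t]
        simp only [Prod.mk.injEq]
        refine ⟨by simp, by push_cast; ring⟩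
      · simp only [pvInner, hgx, hga, if_neg hxa]
        have hnoins : ∀ y ∈ t ++ [a], (fun a b => decide (a < b)) x y = false := by
          intro y hy
          rcases List.mem_append.mp hy with h | h
          · have := hta y h; simp; omega
          · simp at h; subst h; simp; omega
        have hins : pvIns x (t ++ [a]) = (t ++ [a]) ++ [x] :=
          PySem.List.insertBy_of_forall_not_before _ _ _ hnoins
        have hsorted' : ((t ++ a :: x :: rest).take (t.length + 1)).Pairwise (· ≤ ·) := by
          rw [pv_take_append]; exact hsort
        rw [pvInner_no_swap t.length (t ++ a :: x :: rest) (c+1) (by simp) hsorted']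
        rw [hins]
        simp only [Prod.mk.injEq]
        refine ⟨by simp, by push_cast; ring⟩

-- outer-loop invariant: after i passes the state is (insert-sorted prefix ++ rest, pvT i)
lemma pv_outer_inv (xs : List Int) : ∀ i, i ≤ xs.length →
    (List.range i).foldl (fun st k => pvInner st.1 (st.2 + 1) k) (xs, 0)
      = ((xs.take i).foldl (fun acc x => pvIns x acc) [] ++ xs.drop i, (pvT i : Int)) := by
  intro i
  induction i with
  | zero => intro _; simp [pvT]
  | succ i ih =>
      intro hle
      have hi : i < xs.length := by omega
      rw [List.range_succ, List.foldl_append, ih (by omega)]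
      simp only [List.foldl_cons, List.foldl_nil]
      have hS : (xs.take i).foldl (fun acc x => pvIns x acc) []
          = PySem.List.sorted (xs.take i) (fun x => x) false := by
        rw [PySem.List.sorted_eq_foldl_insertBy]; rfl
      have hSsort : ((xs.take i).foldl (fun acc x => pvIns x acc) []).Pairwise (· ≤ ·) := by
        rw [hS]
        simpa using PySem.List.sorted_pairwise (xs := xs.take i) (key := fun x => x)
      have hSlen : ((xs.take i).foldl (fun acc x => pvIns x acc) []).length = i := by
        rw [hS, PySem.List.length_sorted]
        simp [List.length_take]; omega
      have hdrop : xs.drop i = xs[i] :: xs.drop (i+1) := List.drop_eq_getElem_cons hi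
      have hb := pvInner_bubble _ hSsort xs[i] (xs.drop (i+1)) ((pvT i : Int) + 1)
      rw [hSlen] at hb
      rw [hdrop, hb]
      simp only [Prod.mk.injEq]
      constructor
      · have htake : xs.take (i+1) = xs.take i ++ [xs[i]] := by
          rw [List.take_add_one, List.getElem?_eq_getElem hi]; rfl
        rw [htake, List.foldl_append]
        rfl
      · simp only [pvT]; push_cast; ring

-- ===== VERDICT (by name: the statement is the Claim_ definition above) =====
theorem first_insertion_sort_spec : Claim_equal_first_insertion_sort := by
  intro numbers _
  unfold Spec_first_insertion_sort first_insertion_sort first_insertion_sort_alt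
  rw [pv_outer_inv numbers numbers.length (le_refl _)]
  simp only [List.take_length, List.drop_length, List.append_nil]
  rw [pvT_closed]
  rw [PySem.List.sorted_eq_foldl_insertBy]
  rfl
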